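-- pv_equiv track=rewrite | github.com/zagerpatrick/BMI203_Project1 | align/.ipynb_checkpoints/util-checkpoint.py | argmaxdup
-- ===== SOURCE A (Python) =====
-- def argmaxdup(a):
--     '''
--     Returns the indices of the maximum values, returing multiple indices if
--     there are duplicate max values.
--
--     Parameters
--     ----------
--     a : list
--         input list
--
--     Returns
--     ----------
--     maxdup: list
--         list of indices of maximum values.
--     '''
--
--     if len(a) == 0:
--         return []
--     maxdup = [0]
--     max_ = a[0]
--     for i in range(1, len(a)):
--         if a[i] > max_:
--             maxdup = [i]
--             max_ = a[i]
--         elif a[i] == max_: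
--             maxdup.append(i)
--     return maxdup
-- ===== SOURCE B (Python) =====
-- def argmaxdup(a):
--     '''
--     Returns the indices of the maximum values, returning multiple indices if
--     there are duplicate max values.
--     '''
--     if len(a) == 0:
--         return []
--     m = max(a)
--     return [i for i, x in enumerate(a) if x == m]
-- ===== Notes on version B (the rewrite author's own statement) =====
-- stated objective: idiomatic
-- what changed: Replaced the single-pass running-max loop that rebuilds/appends the index list per element by a two-pass compute-max-then-filter: m = max(a) once, then a comprehension over enumerate(a) keeps the indices where x == m.
import Mathlib
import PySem

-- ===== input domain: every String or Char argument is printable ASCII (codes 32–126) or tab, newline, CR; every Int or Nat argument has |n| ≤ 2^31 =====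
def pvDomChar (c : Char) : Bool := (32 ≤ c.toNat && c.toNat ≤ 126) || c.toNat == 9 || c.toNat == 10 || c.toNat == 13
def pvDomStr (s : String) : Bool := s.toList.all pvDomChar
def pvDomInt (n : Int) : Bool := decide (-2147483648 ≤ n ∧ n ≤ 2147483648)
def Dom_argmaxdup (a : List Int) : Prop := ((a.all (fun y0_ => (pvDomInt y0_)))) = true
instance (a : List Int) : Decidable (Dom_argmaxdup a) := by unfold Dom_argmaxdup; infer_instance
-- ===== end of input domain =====

-- B replaces A's single-pass running-max-with-list-rebuilding by the idiomatic two-pass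
-- compute-max-then-filter form; same return value on every input (both are total).

-- ===== PORT A =====
def argmaxdup (a : List Int) : List Int :=
  if a.length = 0 then []
  else
    ((PySem.List.pyRange 1 a.length 1).foldl
      (fun (st : List Int × Int) i =>
        if PySem.List.pyGetD a i 0 > st.2 then ([i], PySem.List.pyGetD a i 0)
        else if PySem.List.pyGetD a i 0 = st.2 then (st.1 ++ [i], st.2)
        else st)
      ([0], PySem.List.pyGetD a 0 0)).1

-- ===== PORT B =====
def argmaxdup_alt (a : List Int) : List Int :=
  if a.length = 0 then []
  else
    match PySem.List.max? a (fun y => y) with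
    | none => []
    | some m => ((PySem.List.enumerate a 0).filter (fun p => decide (p.2 = m))).map (fun p => p.1)

-- ===== PRECONDITION & SPEC =====
def Spec_argmaxdup (a : List Int) (out : List Int) : Prop := out = argmaxdup_alt a
instance (a : List Int) (out : List Int) : Decidable (Spec_argmaxdup a out) := by unfold Spec_argmaxdup; infer_instance

-- ===== CLAIM (what is proved, stated in full; the proofs are below) =====
def Claim_equal_argmaxdup : Prop := ∀ (a : List Int), Dom_argmaxdup a → Spec_argmaxdup a (argmaxdup a)

-- ===== LEMMAS AND PROOFS =====

-- A's loop body, abstracted over the index and the value it reads.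
def pvStepA (st : List Int × Int) (i v : Int) : List Int × Int :=
  if v > st.2 then ([i], v)
  else if v = st.2 then (st.1 ++ [i], st.2)
  else st

-- The pyRange fold over indices equals a structural fold over enumerate of the suffix.
theorem pvFoldRange (suf : List Int) : ∀ (pre : List Int) (st : List Int × Int),
    (PySem.List.pyRange pre.length (pre.length + suf.length) 1).foldl
      (fun st i => pvStepA st i (PySem.List.pyGetD (pre ++ suf) i 0)) st
    = (PySem.List.enumerate suf (pre.length : Int)).foldl
        (fun st p => pvStepA st p.1 p.2) st := by
  induction suf with
  | nil =>
    intro pre st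
    simp [PySem.List.pyRange_one_eq_nil, PySem.List.enumerate_nil]
  | cons y ys ih =>
    intro pre st
    rw [PySem.List.pyRange_one_cons (by simp)]
    rw [PySem.List.enumerate_cons]
    simp only [List.foldl_cons]
    have hget : PySem.List.pyGetD (pre ++ y :: ys) (pre.length : Int) 0 = y := by
      rw [PySem.List.pyGetD_natCast]
      simp [List.getD]
    rw [hget]
    have := ih (pre ++ [y]) (pvStepA st (pre.length : Int) y)
    have hlist : pre ++ [y] ++ ys = pre ++ y :: ys := by simp
    rw [hlist] at this
    simp only [List.length_append, List.length_cons, List.length_nil] at this ⊢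
    push_cast at this ⊢
    ring_nf at this ⊢
    exact this

-- Invariant of A's fold: final max is the running max, final list is the old list
-- (kept iff the max did not grow) followed by the indices of the final max.
theorem pvFoldInv (xs : List Int) : ∀ (s : Int) (lst : List Int) (m : Int),
    (PySem.List.enumerate xs s).foldl (fun st p => pvStepA st p.1 p.2) (lst, m)
    = ((if xs.foldl max m = m then lst else [])
        ++ ((PySem.List.enumerate xs s).filter (fun p => decide (p.2 = xs.foldl max m))).map (fun p => p.1),
       xs.foldl max m) := by
  induction xs with
  | nil => intro s lst m; simp [PySem.List.enumerate_nil]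
  | cons x xs ih =>
    intro s lst m
    rw [PySem.List.enumerate_cons]
    simp only [List.foldl_cons, List.filter_cons]
    have hM : (x :: xs).foldl max m = xs.foldl max (max m x) := by simp
    by_cases h1 : x > m
    · have hstep : pvStepA (lst, m) s x = ([s], x) := by simp [pvStepA, h1]
      rw [hstep, ih (s+1) [s] x]
      have hmx : max m x = x := by omega
      have hne : xs.foldl max x ≠ m := by
        have := (PySem.List.le_foldl_max xs x).1; omega
      simp only [hmx, if_neg hne]
      by_cases h2 : x = xs.foldl max x
      · simp [← h2]
      · simp [h2, Ne.symm h2]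
    · have hmx : max m x = m := by omega
      by_cases h2 : x = m
      · have hstep : pvStepA (lst, m) s x = (lst ++ [s], m) := by simp [pvStepA, h2]
        rw [hstep, ih (s+1) (lst ++ [s]) m]
        simp only [hmx]
        by_cases h3 : xs.foldl max m = m
        · simp [h3, h2, List.append_assoc]
        · have : ¬ x = xs.foldl max m := by rw [h2]; exact fun h => h3 h.symm
          simp [h3, this]
      · have hstep : pvStepA (lst, m) s x = (lst, m) := by simp [pvStepA, h1, h2]
        rw [hstep, ih (s+1) lst m]
        simp only [hmx]
        have : ¬ x = xs.foldl max m := by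
          have := (PySem.List.le_foldl_max xs m).1; omega
        simp [this]

-- ===== VERDICT (by name: the statement is the Claim_ definition above) =====
theorem argmaxdup_spec : Claim_equal_argmaxdup := by
  intro a _
  unfold Spec_argmaxdup argmaxdup argmaxdup_alt
  match a with
  | [] => simp
  | x :: xs =>
    simp only [List.length_cons, Nat.succ_ne_zero]
    rw [PySem.List.max?_id_cons]
    have hrange := pvFoldRange xs [x] ([0], PySem.List.pyGetD (x :: xs) 0 0)
    simp only [List.length_singleton, List.singleton_append] at hrange
    have hget0 : PySem.List.pyGetD (x :: xs) 0 0 = x := PySem.List.pyGetD_zero_cons x xs 0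
    rw [hget0]
    simp only [if_false]
    have hbody : (fun (st : List Int × Int) (i : Int) =>
        if PySem.List.pyGetD (x :: xs) i 0 > st.2 then ([i], PySem.List.pyGetD (x :: xs) i 0)
        else if PySem.List.pyGetD (x :: xs) i 0 = st.2 then (st.1 ++ [i], st.2)
        else st)
      = fun st i => pvStepA st i (PySem.List.pyGetD (x :: xs) i 0) := rfl
    rw [hbody]
    rw [hget0] at hrange
    push_cast at hrange
    have hr : (PySem.List.pyRange 1 ((xs.length + 1 : Nat) : Int) 1)
        = PySem.List.pyRange (1 : Int) (1 + (xs.length : Int)) 1 := by push_cast; ring_nf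
    rw [hr, hrange, pvFoldInv xs 1 [0] x]
    rw [PySem.List.enumerate_cons]
    simp only [List.filter_cons]
    by_cases hx : x = List.foldl max x xs
    · simp [← hx]
    · have hx' : List.foldl max x xs ≠ x := fun h => hx h.symm
      simp [hx, hx']
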